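-- pv_equiv track=rewrite | github.com/haltmayermarc/Samsung_ICML | LOD.py | build_coarse_adjacency_edge
-- ===== SOURCE A (Python) =====
-- def build_coarse_adjacency_edge(coarse_elems):
--     # coarse_elems: (Nelem, 3)
--     edge2elems = {}
--     for e, tri in enumerate(coarse_elems):
--         a, b, c = tri
--         edges = [tuple(sorted((a, b))),
--                  tuple(sorted((b, c))),
--                  tuple(sorted((c, a)))]
--         for ed in edges:
--             edge2elems.setdefault(ed, []).append(e)
--
--     adjacency = [set() for _ in range(len(coarse_elems))]
--     for elems in edge2elems.values():
--         if len(elems) > 1: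
--             for e in elems:
--                 for ee in elems:
--                     if ee != e:
--                         adjacency[e].add(ee)
--     return adjacency
-- ===== SOURCE B (Python) =====
-- def build_coarse_adjacency_edge(coarse_elems):
--     # Group elements by shared (sorted) edge once, then GATHER each element's
--     # neighbour set with one comprehension per element instead of A's in-place
--     # scatter over a mutable array of sets.
--     edge2elems = {}
--     for e, (a, b, c) in enumerate(coarse_elems):
--         for u, v in ((a, b), (b, c), (c, a)):
--             ed = (u, v) if u <= v else (v, u)
--             edge2elems.setdefault(ed, []).append(e)
--     groups = list(edge2elems.values())
--     return [{f for g in groups if e in g for f in g if f != e}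
--             for e in range(len(coarse_elems))]
-- ===== Notes on version B (the rewrite author's own statement) =====
-- stated objective: alternative
-- what changed: Replaces A's scatter phase (a mutable array of sets updated in place while iterating edge groups) by a gather: one set comprehension per element over the edge groups, with the sorted-edge key computed by a comparison instead of tuple(sorted(...)).
import Mathlib
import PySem

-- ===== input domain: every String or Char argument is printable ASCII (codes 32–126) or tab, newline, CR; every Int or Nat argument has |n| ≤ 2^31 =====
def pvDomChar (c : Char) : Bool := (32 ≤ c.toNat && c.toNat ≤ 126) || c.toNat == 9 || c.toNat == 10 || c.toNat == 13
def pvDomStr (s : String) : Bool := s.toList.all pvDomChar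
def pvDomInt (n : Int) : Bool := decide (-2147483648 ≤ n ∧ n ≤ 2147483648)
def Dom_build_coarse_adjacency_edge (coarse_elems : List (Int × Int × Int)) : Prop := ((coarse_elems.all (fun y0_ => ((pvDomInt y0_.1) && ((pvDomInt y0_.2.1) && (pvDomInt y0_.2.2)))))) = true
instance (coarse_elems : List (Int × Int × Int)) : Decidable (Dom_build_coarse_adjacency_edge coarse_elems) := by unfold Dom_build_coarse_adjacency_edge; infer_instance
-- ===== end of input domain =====

-- B replaces A's in-place scatter over a mutable array of sets by a per-element gather
-- comprehension over the edge groups (objective: alternative; equal return value, no mutation claim).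

-- ===== PORT A =====
-- tuple(sorted((a, b)))
def pvA_edgeKey (a b : Int) : Int × Int :=
  match PySem.List.sorted [a, b] (fun x => x) false with
  | [x, y] => (x, y)
  | _ => (a, b)   -- unreachable: sorted of a two-element list has two elements

-- edge2elems.setdefault(ed, []).append(e)
def pvA_insertEdge (d : PySem.Dict (Int × Int) (List Int)) (ed : Int × Int) (e : Int) :
    PySem.Dict (Int × Int) (List Int) :=
  d.insert ed (d.getD ed [] ++ [e])

def pvA_edgeDict (ce : List (Int × Int × Int)) : PySem.Dict (Int × Int) (List Int) :=
  (PySem.List.enumerate ce 0).foldl (fun d p =>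
    [pvA_edgeKey p.2.1 p.2.2.1, pvA_edgeKey p.2.2.1 p.2.2.2, pvA_edgeKey p.2.2.2 p.2.1].foldl
      (fun d ed => pvA_insertEdge d ed p.1) d) PySem.Dict.empty

-- adjacency[e].add(ee); e is an enumerate index, hence always a valid index (pyGetD/pySetD are exact there)
def pvA_addAt (adj : List (PySem.Set Int)) (e ee : Int) : List (PySem.Set Int) :=
  PySem.List.pySetD adj e (PySem.Set.add (PySem.List.pyGetD adj e PySem.Set.empty) ee)

def build_coarse_adjacency_edge (coarse_elems : List (Int × Int × Int)) : List (List Int) :=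
  let d := pvA_edgeDict coarse_elems
  let adjacency : List (PySem.Set Int) :=
    (List.range coarse_elems.length).map (fun _ => PySem.Set.empty)
  d.values.foldl (fun adj elems =>
    if elems.length > 1 then
      elems.foldl (fun adj e =>
        elems.foldl (fun adj ee => if ee ≠ e then pvA_addAt adj e ee else adj) adj) adj
    else adj) adjacency

-- ===== PORT B =====
-- (u, v) if u <= v else (v, u)
def pvB_edgeKey (u v : Int) : Int × Int := if u ≤ v then (u, v) else (v, u)

-- edge2elems.setdefault(ed, []).append(e) with ed computed from the endpoints
def pvB_addEdge (d : PySem.Dict (Int × Int) (List Int)) (u v e : Int) :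
    PySem.Dict (Int × Int) (List Int) :=
  d.insert (pvB_edgeKey u v) (d.getD (pvB_edgeKey u v) [] ++ [e])

def pvB_edgeDict (ce : List (Int × Int × Int)) : PySem.Dict (Int × Int) (List Int) :=
  (PySem.List.enumerate ce 0).foldl (fun d p =>
    [(p.2.1, p.2.2.1), (p.2.2.1, p.2.2.2), (p.2.2.2, p.2.1)].foldl
      (fun d uv => pvB_addEdge d uv.1 uv.2 p.1) d) PySem.Dict.empty

-- {f for g in groups if e in g for f in g if f != e}
def pvB_gather (e : Int) (groups : List (List Int)) : PySem.Set Int :=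
  groups.foldl (fun s g =>
    if g.contains e then g.foldl (fun s f => if f ≠ e then PySem.Set.add s f else s) s else s)
    PySem.Set.empty

def build_coarse_adjacency_edge_alt (coarse_elems : List (Int × Int × Int)) : List (List Int) :=
  let groups := (pvB_edgeDict coarse_elems).values
  (PySem.List.pyRange 0 coarse_elems.length 1).map (fun e => pvB_gather e groups)

-- ===== PRECONDITION & SPEC =====
def Spec_build_coarse_adjacency_edge (coarse_elems : List (Int × Int × Int)) (out : List (List Int)) : Prop := out = build_coarse_adjacency_edge_alt coarse_elems
instance (coarse_elems : List (Int × Int × Int)) (out : List (List Int)) : Decidable (Spec_build_coarse_adjacency_edge coarse_elems out) := by unfold Spec_build_coarse_adjacency_edge; infer_instance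

-- ===== CLAIM (what is proved, stated in full; the proofs are below) =====
def Claim_equal_build_coarse_adjacency_edge : Prop := ∀ (coarse_elems : List (Int × Int × Int)), Dom_build_coarse_adjacency_edge coarse_elems → Spec_build_coarse_adjacency_edge coarse_elems (build_coarse_adjacency_edge coarse_elems)

-- ===== LEMMAS AND PROOFS =====

-- the two edge keys agree
theorem pv_edgeKey_eq (a b : Int) : pvA_edgeKey a b = pvB_edgeKey a b := by
  unfold pvA_edgeKey pvB_edgeKey
  rw [PySem.List.sorted_eq_foldl_insertBy]
  by_cases h : a ≤ b
  · simp [List.foldl, PySem.List.insertBy, not_lt.mpr h, h]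
  · simp [List.foldl, PySem.List.insertBy, h, not_le.mp h]

-- both ports build the same edge dictionary
theorem pv_dict_eq (ce : List (Int × Int × Int)) : pvA_edgeDict ce = pvB_edgeDict ce := by
  unfold pvA_edgeDict pvB_edgeDict
  congr 1
  funext d p
  simp [List.foldl, pvA_insertEdge, pvB_addEdge, pv_edgeKey_eq]

-- the inner conditional-add fold of both ports, as a function on one set
def pvF (e : Int) (g : List Int) (s : PySem.Set Int) : PySem.Set Int :=
  g.foldl (fun s f => if f ≠ e then PySem.Set.add s f else s) s

-- what one edge group contributes to element e's adjacency set
def pvStepAt (e : Int) (s : PySem.Set Int) (g : List Int) : PySem.Set Int :=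
  if g.contains e then pvF e g s else s

theorem pv_gather_eq (e : Int) (groups : List (List Int)) :
    pvB_gather e groups = groups.foldl (pvStepAt e) PySem.Set.empty := rfl

theorem pv_mem_pvF (e : Int) (g : List Int) (s : PySem.Set Int) (y : Int) :
    y ∈ pvF e g s ↔ y ∈ s ∨ (y ∈ g ∧ y ≠ e) := by
  induction g generalizing s with
  | nil => simp [pvF]
  | cons f t ih =>
    have hstep : pvF e (f :: t) s = pvF e t (if f ≠ e then PySem.Set.add s f else s) := rfl
    rw [hstep]
    by_cases h : f = e
    · rw [if_neg (not_not_intro h)]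
      rw [ih]
      subst h
      constructor
      · rintro (hs | ⟨ht, hne⟩)
        · exact Or.inl hs
        · exact Or.inr ⟨List.mem_cons_of_mem _ ht, hne⟩
      · rintro (hs | ⟨hm, hne⟩)
        · exact Or.inl hs
        · rcases List.mem_cons.mp hm with rfl | ht
          · exact absurd rfl hne
          · exact Or.inr ⟨ht, hne⟩
    · rw [if_pos h, ih]
      rw [PySem.Set.mem_add]
      constructor
      · rintro ((hs | rfl) | ⟨ht, hne⟩)
        · exact Or.inl hs
        · exact Or.inr ⟨List.mem_cons_self .., h⟩
        · exact Or.inr ⟨List.mem_cons_of_mem _ ht, hne⟩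
      · rintro (hs | ⟨hm, hne⟩)
        · exact Or.inl (Or.inl hs)
        · rcases List.mem_cons.mp hm with rfl | ht
          · exact Or.inl (Or.inr rfl)
          · exact Or.inr ⟨ht, hne⟩

theorem pv_pvF_of_subset (e : Int) (g : List Int) (s : PySem.Set Int)
    (h : ∀ y ∈ g, y ≠ e → y ∈ s) : pvF e g s = s := by
  induction g generalizing s with
  | nil => rfl
  | cons f t ih =>
    have hstep : pvF e (f :: t) s = pvF e t (if f ≠ e then PySem.Set.add s f else s) := rfl
    rw [hstep]
    by_cases hf : f = e
    · rw [if_neg (not_not_intro hf)]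
      exact ih _ (fun y hy hne => h y (List.mem_cons_of_mem _ hy) hne)
    · rw [if_pos hf, PySem.Set.add_of_mem (h f (List.mem_cons_self ..) hf)]
      exact ih _ (fun y hy hne => h y (List.mem_cons_of_mem _ hy) hne)

theorem pv_pvF_idem (e : Int) (g : List Int) (s : PySem.Set Int) :
    pvF e g (pvF e g s) = pvF e g s := by
  apply pv_pvF_of_subset
  intro y hy hne
  exact (pv_mem_pvF e g s y).mpr (Or.inr ⟨hy, hne⟩)

-- pointwise effect of a single adjacency[x].add(ee)
theorem pv_addAt_getD (adj : List (PySem.Set Int)) (x ee : Int) (hx : 0 ≤ x)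
    (hlt : x.toNat < adj.length) :
    (pvA_addAt adj x ee).length = adj.length ∧
      ∀ j : Nat, (pvA_addAt adj x ee).getD j PySem.Set.empty =
        if j = x.toNat then PySem.Set.add (adj.getD j PySem.Set.empty) ee
        else adj.getD j PySem.Set.empty := by
  obtain ⟨m, rfl⟩ : ∃ m : Nat, x = (m : Int) := ⟨x.toNat, (Int.toNat_of_nonneg hx).symm⟩
  have hm : m < adj.length := by simpa using hlt
  have hset : ∀ v, PySem.List.pySetD adj ((m : Nat) : Int) v = adj.set m v := by
    intro v
    unfold PySem.List.pySetD
    rw [PySem.List.pySet?_natCast] <;> simp [hm]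
  have hget : PySem.List.pyGetD adj ((m : Nat) : Int) PySem.Set.empty = adj.getD m PySem.Set.empty := by
    simp [PySem.List.pyGetD_natCast, List.getD_eq_getElem?_getD]
  have hgen : ∀ (xs : List (PySem.Set Int)) (p j : Nat) (v : PySem.Set Int),
      (xs.set p v).getD j PySem.Set.empty =
        if j = p ∧ j < xs.length then v else xs.getD j PySem.Set.empty := by
    intro xs p j v
    simp [List.getD_eq_getElem?_getD, List.getElem?_set]
    split_ifs <;> simp_all
    omega
  constructor
  · unfold pvA_addAt
    rw [hset]
    simp
  · intro j
    unfold pvA_addAt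
    rw [hset, hget, hgen]
    by_cases hjm : j = m
    · subst hjm
      simp [hm]
    · simp [hjm]

-- pointwise effect of the inner  for ee in elems: …  loop
theorem pv_inner_getD (g : List Int) (adj : List (PySem.Set Int)) (x : Int) (hx : 0 ≤ x)
    (hlt : x.toNat < adj.length) :
    (g.foldl (fun adj ee => if ee ≠ x then pvA_addAt adj x ee else adj) adj).length = adj.length ∧
      ∀ j : Nat, (g.foldl (fun adj ee => if ee ≠ x then pvA_addAt adj x ee else adj) adj).getD j PySem.Set.empty =
        if j = x.toNat then pvF x g (adj.getD j PySem.Set.empty)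
        else adj.getD j PySem.Set.empty := by
  induction g generalizing adj with
  | nil =>
    refine ⟨rfl, fun j => ?_⟩
    split_ifs <;> rfl
  | cons ee t ih =>
    have hstep : ∀ s, pvF x (ee :: t) s = pvF x t (if ee ≠ x then PySem.Set.add s ee else s) := fun s => rfl
    have hfold : (ee :: t).foldl (fun adj ee => if ee ≠ x then pvA_addAt adj x ee else adj) adj =
        t.foldl (fun adj ee => if ee ≠ x then pvA_addAt adj x ee else adj)
          (if ee ≠ x then pvA_addAt adj x ee else adj) := rfl
    rw [hfold]
    by_cases hee : ee = x
    · rw [if_neg (not_not_intro hee)]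
      obtain ⟨hl, hp⟩ := ih adj hlt
      refine ⟨hl, fun j => ?_⟩
      rw [hp j, hstep, if_neg (not_not_intro hee)]
    · rw [if_pos hee]
      obtain ⟨hal, hap⟩ := pv_addAt_getD adj x ee hx hlt
      obtain ⟨hl, hp⟩ := ih (pvA_addAt adj x ee) (hal ▸ hlt)
      refine ⟨hl.trans hal, fun j => ?_⟩
      rw [hp j, hap j, hstep, if_pos hee]
      by_cases hj : j = x.toNat <;> simp [hj]

-- pointwise effect of the outer  for e in elems: …  loop
theorem pv_outer_getD (g l : List Int) (adj : List (PySem.Set Int))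
    (hb : ∀ x ∈ l, 0 ≤ x ∧ x.toNat < adj.length) :
    (l.foldl (fun adj x => g.foldl (fun adj ee => if ee ≠ x then pvA_addAt adj x ee else adj) adj) adj).length = adj.length ∧
      ∀ j : Nat, (l.foldl (fun adj x => g.foldl (fun adj ee => if ee ≠ x then pvA_addAt adj x ee else adj) adj) adj).getD j PySem.Set.empty =
        if (j : Int) ∈ l then pvF (j : Int) g (adj.getD j PySem.Set.empty)
        else adj.getD j PySem.Set.empty := by
  induction l generalizing adj with
  | nil => exact ⟨rfl, fun j => by simp⟩
  | cons x t ih =>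
    obtain ⟨hx0, hxlt⟩ := hb x (List.mem_cons_self ..)
    obtain ⟨hil, hip⟩ := pv_inner_getD g adj x hx0 hxlt
    set adj1 := g.foldl (fun adj ee => if ee ≠ x then pvA_addAt adj x ee else adj) adj with hadj1
    have hb' : ∀ y ∈ t, 0 ≤ y ∧ y.toNat < adj1.length := by
      intro y hy
      obtain ⟨h1, h2⟩ := hb y (List.mem_cons_of_mem _ hy)
      exact ⟨h1, hil ▸ h2⟩
    obtain ⟨hl, hp⟩ := ih adj1 hb'
    have hfold : (x :: t).foldl (fun adj x => g.foldl (fun adj ee => if ee ≠ x then pvA_addAt adj x ee else adj) adj) adj =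
        t.foldl (fun adj x => g.foldl (fun adj ee => if ee ≠ x then pvA_addAt adj x ee else adj) adj) adj1 := rfl
    rw [hfold]
    refine ⟨hl.trans hil, fun j => ?_⟩
    rw [hp j]
    by_cases hjx : j = x.toNat
    · have hxj : x = (j : Int) := by omega
      have hmem : (j : Int) ∈ x :: t := by rw [← hxj]; exact List.mem_cons_self ..
      rw [if_pos hmem]
      have hadj1j : adj1.getD j PySem.Set.empty = pvF (j : Int) g (adj.getD j PySem.Set.empty) := by
        rw [hip j, if_pos hjx, hxj]
      by_cases hjt : (j : Int) ∈ t
      · rw [if_pos hjt, hadj1j, pv_pvF_idem]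
      · rw [if_neg hjt, hadj1j]
    · have hxj : x ≠ (j : Int) := by omega
      have hadj1j : adj1.getD j PySem.Set.empty = adj.getD j PySem.Set.empty := by
        rw [hip j, if_neg hjx]
      by_cases hjt : (j : Int) ∈ t
      · rw [if_pos hjt, if_pos (List.mem_cons_of_mem _ hjt), hadj1j]
      · have : (j : Int) ∉ x :: t := by
          intro hc
          rcases List.mem_cons.mp hc with hc | hc
          · exact hxj hc.symm
          · exact hjt hc
        rw [if_neg hjt, if_neg this, hadj1j]

-- one scatter step equals one gather step, pointwise
theorem pv_stepAt_of_short (e : Int) (s : PySem.Set Int) (g : List Int)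
    (hg : ¬ g.length > 1) : pvStepAt e s g = s := by
  rcases g with _ | ⟨x, _ | ⟨y, t⟩⟩
  · rfl
  · unfold pvStepAt pvF
    by_cases hx : x = e
    · simp [List.foldl, hx]
    · simp [List.foldl, hx]
      intro h
      exact absurd h.symm hx
  · exact absurd (by simp : (x :: y :: t).length > 1) hg

theorem pv_step_getD (g : List Int) (adj : List (PySem.Set Int))
    (hb : ∀ x ∈ g, 0 ≤ x ∧ x.toNat < adj.length) :
    ((if g.length > 1 then
        g.foldl (fun adj x => g.foldl (fun adj ee => if ee ≠ x then pvA_addAt adj x ee else adj) adj) adj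
      else adj)).length = adj.length ∧
      ∀ j : Nat, j < adj.length → ((if g.length > 1 then
        g.foldl (fun adj x => g.foldl (fun adj ee => if ee ≠ x then pvA_addAt adj x ee else adj) adj) adj
      else adj)).getD j PySem.Set.empty =
        pvStepAt (j : Int) (adj.getD j PySem.Set.empty) g := by
  by_cases hg : g.length > 1
  · rw [if_pos hg]
    obtain ⟨hl, hp⟩ := pv_outer_getD g g adj hb
    refine ⟨hl, fun j hj => ?_⟩
    rw [hp j]
    unfold pvStepAt
    by_cases hm : (j : Int) ∈ g
    · rw [if_pos hm, if_pos (by simpa [List.contains_iff_mem] using hm)]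
    · rw [if_neg hm, if_neg (by simpa [List.contains_iff_mem] using hm)]
  · rw [if_neg hg]
    exact ⟨rfl, fun j hj => (pv_stepAt_of_short _ _ _ hg).symm⟩

-- the whole scatter loop, pointwise
theorem pv_scatter_getD (gs : List (List Int)) (adj : List (PySem.Set Int))
    (hb : ∀ g ∈ gs, ∀ x ∈ g, 0 ≤ x ∧ x.toNat < adj.length) :
    (gs.foldl (fun adj elems =>
        if elems.length > 1 then
          elems.foldl (fun adj e =>
            elems.foldl (fun adj ee => if ee ≠ e then pvA_addAt adj e ee else adj) adj) adj
        else adj) adj).length = adj.length ∧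
      ∀ j : Nat, j < adj.length → (gs.foldl (fun adj elems =>
        if elems.length > 1 then
          elems.foldl (fun adj e =>
            elems.foldl (fun adj ee => if ee ≠ e then pvA_addAt adj e ee else adj) adj) adj
        else adj) adj).getD j PySem.Set.empty =
        gs.foldl (pvStepAt (j : Int)) (adj.getD j PySem.Set.empty) := by
  induction gs generalizing adj with
  | nil => exact ⟨rfl, fun j hj => rfl⟩
  | cons g gs ih =>
    obtain ⟨hsl, hsp⟩ := pv_step_getD g adj (hb g (List.mem_cons_self ..))
    set adj1 := (if g.length > 1 then
        g.foldl (fun adj x => g.foldl (fun adj ee => if ee ≠ x then pvA_addAt adj x ee else adj) adj) adj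
      else adj) with hadj1
    have hb' : ∀ g' ∈ gs, ∀ x ∈ g', 0 ≤ x ∧ x.toNat < adj1.length := by
      intro g' hg' x hx
      obtain ⟨h1, h2⟩ := hb g' (List.mem_cons_of_mem _ hg') x hx
      exact ⟨h1, hsl ▸ h2⟩
    obtain ⟨hl, hp⟩ := ih adj1 hb'
    refine ⟨hl.trans hsl, fun j hj => ?_⟩
    have hfold : ((g :: gs).foldl (fun adj elems =>
        if elems.length > 1 then
          elems.foldl (fun adj e =>
            elems.foldl (fun adj ee => if ee ≠ e then pvA_addAt adj e ee else adj) adj) adj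
        else adj) adj) = (gs.foldl (fun adj elems =>
        if elems.length > 1 then
          elems.foldl (fun adj e =>
            elems.foldl (fun adj ee => if ee ≠ e then pvA_addAt adj e ee else adj) adj) adj
        else adj) adj1) := rfl
    rw [hfold, hp j (hsl ▸ hj), hsp j hj]
    rfl

-- every element index stored in the dictionary is a valid index
theorem pv_dict_values_bounded (ce : List (Int × Int × Int)) :
    ∀ v ∈ (pvA_edgeDict ce).values, ∀ x ∈ v, 0 ≤ x ∧ x.toNat < ce.length := by
  have hins : ∀ (d : PySem.Dict (Int × Int) (List Int)) (ed : Int × Int) (e : Int),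
      (∀ v ∈ d.values, ∀ x ∈ v, 0 ≤ x ∧ x.toNat < ce.length) →
      (0 ≤ e ∧ e.toNat < ce.length) →
      ∀ v ∈ (pvA_insertEdge d ed e).values, ∀ x ∈ v, 0 ≤ x ∧ x.toNat < ce.length := by
    intro d ed e hd he v hv x hx
    unfold pvA_insertEdge at hv
    rcases PySem.Dict.mem_values_insert d ed (d.getD ed [] ++ [e]) v hv with rfl | hv'
    · rcases List.mem_append.mp hx with hx' | hx'
      · rw [PySem.Dict.getD_eq_get?_getD] at hx'
        rcases hq : d.get? ed with _ | w
        · rw [hq] at hx'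
          simp at hx'
        · rw [hq] at hx'
          simp only [Option.getD_some] at hx'
          have hit : (ed, w) ∈ d.items := by
            first
              | exact PySem.Dict.mem_items_of_get?_eq_some hq
              | exact PySem.Dict.mem_items_of_get?_eq_some _ hq
          have hw : w ∈ d.values := List.mem_map.mpr ⟨(ed, w), hit, rfl⟩
          exact hd w hw x hx'
      · rcases List.mem_singleton.mp hx' with rfl
        exact he
    · exact hd v hv' x hx
  have hfold : ∀ (l : List (Int × (Int × Int × Int))) (d : PySem.Dict (Int × Int) (List Int)),
      (∀ p ∈ l, 0 ≤ p.1 ∧ p.1.toNat < ce.length) →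
      (∀ v ∈ d.values, ∀ x ∈ v, 0 ≤ x ∧ x.toNat < ce.length) →
      ∀ v ∈ (l.foldl (fun d p =>
        [pvA_edgeKey p.2.1 p.2.2.1, pvA_edgeKey p.2.2.1 p.2.2.2, pvA_edgeKey p.2.2.2 p.2.1].foldl
          (fun d ed => pvA_insertEdge d ed p.1) d) d).values, ∀ x ∈ v, 0 ≤ x ∧ x.toNat < ce.length := by
    intro l
    induction l with
    | nil => intro d _ hd; exact hd
    | cons p t ih =>
      intro d hl hd
      refine ih _ (fun q hq => hl q (List.mem_cons_of_mem _ hq)) ?_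
      have hp := hl p (List.mem_cons_self ..)
      exact hins _ _ _ (hins _ _ _ (hins _ _ _ hd hp) hp) hp
  unfold pvA_edgeDict
  refine hfold _ _ ?_ ?_
  · intro p hp
    rcases (PySem.List.mem_enumerate_iff _ _ _).mp hp with ⟨k, hk, rfl⟩
    refine ⟨by simp, by simp; omega⟩
  · intro v hv
    simp [PySem.Dict.values, PySem.Dict.empty] at hv

-- ===== VERDICT (by name: the statement is the Claim_ definition above) =====
theorem build_coarse_adjacency_edge_spec : Claim_equal_build_coarse_adjacency_edge := by
  intro ce _
  unfold Spec_build_coarse_adjacency_edge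
  simp only [build_coarse_adjacency_edge, build_coarse_adjacency_edge_alt]
  have hlen_init : ((List.range ce.length).map (fun _ => (PySem.Set.empty : PySem.Set Int))).length = ce.length := by
    simp
  have hb : ∀ g ∈ (pvA_edgeDict ce).values, ∀ x ∈ g,
      0 ≤ x ∧ x.toNat < ((List.range ce.length).map (fun _ => (PySem.Set.empty : PySem.Set Int))).length := by
    rw [hlen_init]
    exact pv_dict_values_bounded ce
  obtain ⟨hsl, hsp⟩ := pv_scatter_getD (pvA_edgeDict ce).values
    ((List.range ce.length).map (fun _ => (PySem.Set.empty : PySem.Set Int))) hb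
  apply List.ext_getElem
  · rw [hsl, hlen_init]
    simp [PySem.List.length_pyRange_one]
  · intro i h1 h2
    have hi : i < ce.length := by
      rw [hsl, hlen_init] at h1
      exact h1
    have hi' : i < ((List.range ce.length).map (fun _ => (PySem.Set.empty : PySem.Set Int))).length := by
      rw [hlen_init]
      exact hi
    have hinit : ((List.range ce.length).map (fun _ => (PySem.Set.empty : PySem.Set Int))).getD i PySem.Set.empty = PySem.Set.empty := by
      rw [List.getD_eq_getElem _ _ hi']
      simp
    rw [← List.getD_eq_getElem _ PySem.Set.empty h1, hsp i hi', hinit]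
    rw [List.getElem_map, PySem.List.getElem_pyRange_one, zero_add]
    rw [pv_gather_eq, ← pv_dict_eq]
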